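-- pv_equiv track=rewrite | github.com/smtdfc/Genealyze | core/alignment/gotoh_local.py | gotoh_local_alignment
-- ===== SOURCE A (Python) =====
-- def gotoh_local_alignment(seq1, seq2, match_score=1, mismatch_score=-1, gap_open=-2, gap_extend=-1):
--     """
--     Perform local sequence alignment using the Gotoh algorithm with affine gap penalties.
--
--     This function finds the optimal local alignment between two sequences using
--     dynamic programming with affine gap penalties (gap opening and gap extension penalties).
--     It returns the best local alignment score along with the aligned sequences.
--
--     Parameters:
--     - seq1 (str): The first sequence to be aligned.
--     - seq2 (str): The second sequence to be aligned.
--     - match_score (int): The score for matching characters (default is 1).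
--     - mismatch_score (int): The penalty for mismatching characters (default is -1).
--     - gap_open (int): The penalty for opening a gap (default is -2).
--     - gap_extend (int): The penalty for extending a gap (default is -1).
--
--     Returns:
--     - tuple: A tuple containing three values:
--       - Aligned sequence 1 (str) with gaps ('-') inserted.
--       - Aligned sequence 2 (str) with gaps ('-') inserted.
--       - The maximum local alignment score (int), representing the highest scoring local alignment.
--
--     This function uses dynamic programming to calculate the local alignment matrix and traceback
--     to reconstruct the aligned sequences. The traceback starts from the position of the highest
--     scoring local alignment, and continues until it reaches a score of 0.
--     """
--     n = len(seq1)
--     m = len(seq2)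
--
--     M = [[0] * (m + 1) for _ in range(n + 1)]
--     Ix = [[float('-inf')] * (m + 1) for _ in range(n + 1)]
--     Iy = [[float('-inf')] * (m + 1) for _ in range(n + 1)]
--     traceback = [[None] * (m + 1) for _ in range(n + 1)]
--
--     max_score = 0
--     max_pos = (0, 0)
--
--
--     for i in range(1, n + 1):
--         for j in range(1, m + 1):
--             Ix[i][j] = max(Ix[i - 1][j] + gap_extend, M[i - 1][j] + gap_open + gap_extend)
--             Iy[i][j] = max(Iy[i][j - 1] + gap_extend, M[i][j - 1] + gap_open + gap_extend)
--             M[i][j] = max(0,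
--                           M[i - 1][j - 1] + (match_score if seq1[i - 1] == seq2[j - 1] else mismatch_score),
--                           Ix[i][j],
--                           Iy[i][j])
--
--             if M[i][j] > max_score:
--                 max_score = M[i][j]
--                 max_pos = (i, j)
--
--
--             if M[i][j] == 0:
--                 traceback[i][j] = None
--             elif M[i][j] == M[i - 1][j - 1] + (match_score if seq1[i - 1] == seq2[j - 1] else mismatch_score):
--                 traceback[i][j] = 'D'
--             elif M[i][j] == Ix[i][j]:
--                 traceback[i][j] = 'U'
--             else:
--                 traceback[i][j] = 'L'
--
--     aligned_seq1 = []
--     aligned_seq2 = []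
--     i, j = max_pos
--
--     while i > 0 and j > 0 and M[i][j] != 0:
--         if traceback[i][j] == 'D':
--             aligned_seq1.append(seq1[i - 1])
--             aligned_seq2.append(seq2[j - 1])
--             i -= 1
--             j -= 1
--         elif traceback[i][j] == 'U':
--             aligned_seq1.append(seq1[i - 1])
--             aligned_seq2.append('-')
--             i -= 1
--         elif traceback[i][j] == 'L':
--             aligned_seq1.append('-')
--             aligned_seq2.append(seq2[j - 1])
--             j -= 1
--
--     aligned_seq1.reverse()
--     aligned_seq2.reverse()
--
--     return ''.join(aligned_seq1), ''.join(aligned_seq2), max_score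
-- ===== SOURCE B (Python) =====
-- def gotoh_local_alignment(seq1, seq2, match_score=1, mismatch_score=-1, gap_open=-2, gap_extend=-1):
--     # Top-down memoized recursion over cells: one dict (i,j) -> (M, Ix, Iy) replaces
--     # A's four bottom-up 2-D arrays; best cell by built-in max; traceback recomputes
--     # each move from the memoized triples.  Same return value; no side effects.
--     n, m = len(seq1), len(seq2)
--     memo = {}
--     get = memo.get
--     oe = gap_open + gap_extend
--
--     def cell(i, j):
--         if i == 0 or j == 0:
--             return (0, None, None)
--         r = get((i, j))
--         if r is not None:
--             return r
--         up = get((i - 1, j))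
--         if up is None: up = cell(i - 1, j)
--         left = get((i, j - 1))
--         if left is None: left = cell(i, j - 1)
--         diag = get((i - 1, j - 1))
--         if diag is None: diag = cell(i - 1, j - 1)
--         ix = up[0] + oe
--         if up[1] is not None:
--             ix = max(ix, up[1] + gap_extend)
--         iy = left[0] + oe
--         if left[2] is not None:
--             iy = max(iy, left[2] + gap_extend)
--         sub = match_score if seq1[i - 1] == seq2[j - 1] else mismatch_score
--         r = (max(0, diag[0] + sub, ix, iy), ix, iy)
--         memo[(i, j)] = r
--         return r
--
--     best = max([(0, 0, 0)] + [(cell(i, j)[0], -i, -j)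
--                               for i in range(1, n + 1) for j in range(1, m + 1)])
--     score, i, j = best[0], -best[1], -best[2]
--     pairs = []
--     while i > 0 and j > 0 and cell(i, j)[0] != 0:
--         v, ix, _ = cell(i, j)
--         sub = match_score if seq1[i - 1] == seq2[j - 1] else mismatch_score
--         if v == cell(i - 1, j - 1)[0] + sub:
--             pairs.append((seq1[i - 1], seq2[j - 1])); i -= 1; j -= 1
--         elif v == ix:
--             pairs.append((seq1[i - 1], '-')); i -= 1
--         else:
--             pairs.append(('-', seq2[j - 1])); j -= 1
--     return (''.join(c for c, _ in reversed(pairs)),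
--             ''.join(c for _, c in reversed(pairs)), score)
-- ===== Notes on version B (the rewrite author's own statement) =====
-- stated objective: alternative
-- what changed: B replaces A's bottom-up fill of four 2-D arrays (M, Ix, Iy, traceback) with a top-down memoized recursion storing one dict of (M,Ix,Iy) triples keyed by (i,j), finds the best cell with built-in max over (score,-i,-j) tuples instead of A's inline running max, and recomputes traceback moves from the memoized triples instead of reading a stored traceback matrix.
import Mathlib
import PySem

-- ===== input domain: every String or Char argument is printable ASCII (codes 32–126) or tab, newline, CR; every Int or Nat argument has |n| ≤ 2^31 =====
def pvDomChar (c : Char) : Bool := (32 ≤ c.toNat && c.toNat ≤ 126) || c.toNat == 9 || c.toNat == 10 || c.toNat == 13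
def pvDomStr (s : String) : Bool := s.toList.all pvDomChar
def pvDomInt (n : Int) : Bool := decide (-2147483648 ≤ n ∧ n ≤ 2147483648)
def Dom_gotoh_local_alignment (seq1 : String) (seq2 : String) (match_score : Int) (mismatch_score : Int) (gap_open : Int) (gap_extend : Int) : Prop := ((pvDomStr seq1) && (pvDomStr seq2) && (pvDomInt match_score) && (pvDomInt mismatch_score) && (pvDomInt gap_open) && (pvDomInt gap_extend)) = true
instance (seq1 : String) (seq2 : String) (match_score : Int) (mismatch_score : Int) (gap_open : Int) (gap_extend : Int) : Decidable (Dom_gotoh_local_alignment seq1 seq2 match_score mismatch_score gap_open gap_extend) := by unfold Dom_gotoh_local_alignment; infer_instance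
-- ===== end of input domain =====

-- B re-implements A as a top-down memoized recursion: one dict (i,j) ↦ (M,Ix,Iy)
-- replaces A's four bottom-up 2-D arrays, the best cell is picked by max over
-- (score,-i,-j) tuples, and traceback moves are recomputed from the memoized
-- triples; same return value, no side effects.

-- ===== PORT A =====
-- A's preallocated 2-D lists are modelled as index functions Nat → Nat → α
-- (the initial uniform fill is the constant function; `list[i][j] = v` is a
-- pointwise overwrite).  A only indexes with the non-negative in-range indices
-- of its loops, where this model is exact; `none` models float('-inf'), which
-- in A only ever occurs in the never-returned row/column 0 of Ix/Iy.
def gA_set {α : Type} (f : Nat → Nat → α) (i j : Nat) (v : α) : Nat → Nat → α :=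
  fun i' j' => if i' = i ∧ j' = j then v else f i' j'

-- Python's max(x, b) where x may be float('-inf') (`none`) and b is an int.
def gA_pmax (a : Option Int) (b : Int) : Int :=
  match a with
  | none => b
  | some x => max x b

structure GAState where
  M : Nat → Nat → Int
  Ix : Nat → Nat → Option Int
  Iy : Nat → Nat → Option Int
  Tb : Nat → Nat → Option Char
  maxScore : Int
  maxPos : Nat × Nat

-- body of A's inner `for j in range(1, m+1)` loop (j = jj+1)
def gA_inner (s1 s2 : List Char) (ms mm go ge : Int) (i : Nat) (st : GAState) (jj : Nat) : GAState :=
  let j := jj + 1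
  let ixv : Int := gA_pmax ((st.Ix (i-1) j).map (· + ge)) (st.M (i-1) j + go + ge)
  let iyv : Int := gA_pmax ((st.Iy i (j-1)).map (· + ge)) (st.M i (j-1) + go + ge)
  let sub : Int := if s1.getD (i-1) ' ' = s2.getD (j-1) ' ' then ms else mm
  let mv : Int := max (max (max 0 (st.M (i-1) (j-1) + sub)) ixv) iyv
  let M' := gA_set st.M i j mv
  let mx := if mv > st.maxScore then mv else st.maxScore
  let mp := if mv > st.maxScore then (i, j) else st.maxPos
  let tbv : Option Char :=
    if mv = 0 then none
    else if mv = M' (i-1) (j-1) + sub then some 'D'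
    else if mv = ixv then some 'U'
    else some 'L'
  ⟨M', gA_set st.Ix i j (some ixv), gA_set st.Iy i j (some iyv), gA_set st.Tb i j tbv, mx, mp⟩

-- A's traceback `while` loop; the fuel only serves termination (Python's loop
-- always takes one of the three branches: Tb is never None while M ≠ 0)
def gA_tb (s1 s2 : List Char) (M : Nat → Nat → Int) (Tb : Nat → Nat → Option Char) :
    Nat → Nat → Nat → List Char → List Char → List Char × List Char
  | 0, _, _, a1, a2 => (a1, a2)
  | fuel+1, i, j, a1, a2 =>
    if 0 < i ∧ 0 < j ∧ M i j ≠ 0 then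
      if Tb i j = some 'D' then
        gA_tb s1 s2 M Tb fuel (i-1) (j-1) (a1 ++ [s1.getD (i-1) ' ']) (a2 ++ [s2.getD (j-1) ' '])
      else if Tb i j = some 'U' then
        gA_tb s1 s2 M Tb fuel (i-1) j (a1 ++ [s1.getD (i-1) ' ']) (a2 ++ ['-'])
      else if Tb i j = some 'L' then
        gA_tb s1 s2 M Tb fuel i (j-1) (a1 ++ ['-']) (a2 ++ [s2.getD (j-1) ' '])
      else (a1, a2)
    else (a1, a2)

def gotoh_local_alignment (seq1 : String) (seq2 : String) (match_score : Int) (mismatch_score : Int) (gap_open : Int) (gap_extend : Int) : String × String × Int :=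
  let s1 := seq1.toList
  let s2 := seq2.toList
  let n := s1.length
  let m := s2.length
  let init : GAState := ⟨fun _ _ => 0, fun _ _ => none, fun _ _ => none, fun _ _ => none, 0, (0, 0)⟩
  let fin := (List.range n).foldl
    (fun st ii => (List.range m).foldl (gA_inner s1 s2 match_score mismatch_score gap_open gap_extend (ii+1)) st)
    init
  let bi := fin.maxPos.1
  let bj := fin.maxPos.2
  let r := gA_tb s1 s2 fin.M fin.Tb (bi + bj + 1) bi bj [] []
  (String.mk r.1.reverse, String.mk r.2.reverse, fin.maxScore)

-- ===== PORT B =====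
-- B's memo dict (i, j) ↦ (M, Ix, Iy); Python's None (minus infinity in row/col 0)
-- is `none`.  The mutable dict is threaded through every call.
def gB_base : Int × Option Int × Option Int := (0, none, none)

-- B's recursive `cell` with memoization (returns the updated memo and the triple);
-- each dependency tries the memo first (Source B's `get(...) or recurse`), and
-- `go + ge` is Source B's precomputed `oe`.
def gB_cell (s1 s2 : List Char) (ms mm go ge : Int)
    (memo : PySem.Dict (Nat × Nat) (Int × Option Int × Option Int)) (i j : Nat) :
    PySem.Dict (Nat × Nat) (Int × Option Int × Option Int) × (Int × Option Int × Option Int) :=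
  if h : i = 0 ∨ j = 0 then (memo, gB_base)
  else match memo.get? (i, j) with
    | some r => (memo, r)
    | none =>
      let p1 := match memo.get? (i-1, j) with
        | some u => (memo, u)
        | none => gB_cell s1 s2 ms mm go ge memo (i-1) j
      let p2 := match p1.1.get? (i, j-1) with
        | some u => (p1.1, u)
        | none => gB_cell s1 s2 ms mm go ge p1.1 i (j-1)
      let p3 := match p2.1.get? (i-1, j-1) with
        | some u => (p2.1, u)
        | none => gB_cell s1 s2 ms mm go ge p2.1 (i-1) (j-1)
      let ix := match p1.2.2.1 with
        | none => p1.2.1 + (go + ge)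
        | some x => max (p1.2.1 + (go + ge)) (x + ge)
      let iy := match p2.2.2.2 with
        | none => p2.2.1 + (go + ge)
        | some y => max (p2.2.1 + (go + ge)) (y + ge)
      let sub := if s1.getD (i-1) ' ' = s2.getD (j-1) ' ' then ms else mm
      let r := (max (max (max 0 (p3.2.1 + sub)) ix) iy, some ix, some iy)
      (p3.1.insert (i, j) r, r)
  termination_by i + j
  decreasing_by all_goals omega

-- B's comprehension [(cell(i,j)[0], -i, -j) for i … for j …] (threads the memo)
def gB_scan (s1 s2 : List Char) (ms mm go ge : Int) (n m : Nat) :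
    PySem.Dict (Nat × Nat) (Int × Option Int × Option Int) × List (Int × Int × Int) :=
  (List.range n).foldl (fun st ii =>
    (List.range m).foldl (fun st2 jj =>
      let p := gB_cell s1 s2 ms mm go ge st2.1 (ii+1) (jj+1)
      (p.1, st2.2 ++ [(p.2.1, -((ii : Int)+1), -((jj : Int)+1))])) st)
    (PySem.Dict.empty, [])

-- Python's max: lexicographic-greater on (score, -i, -j) triples
def gB_gt (x acc : Int × Int × Int) : Bool :=
  acc.1 < x.1 || (acc.1 == x.1 && (acc.2.1 < x.2.1 || (acc.2.1 == x.2.1 && acc.2.2 < x.2.2)))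

-- B's traceback `while` loop: recompute the move from the memoized triples
-- (priority diagonal, up, left — exactly A's elif chain)
def gB_tb (s1 s2 : List Char) (ms mm go ge : Int)
    (memo : PySem.Dict (Nat × Nat) (Int × Option Int × Option Int)) (i j : Nat)
    (acc : List (Char × Char)) : List (Char × Char) :=
  let p := gB_cell s1 s2 ms mm go ge memo i j
  if h : 0 < i ∧ 0 < j ∧ p.2.1 ≠ 0 then
    let pd := gB_cell s1 s2 ms mm go ge p.1 (i-1) (j-1)
    let sub := if s1.getD (i-1) ' ' = s2.getD (j-1) ' ' then ms else mm
    if p.2.1 = pd.2.1 + sub then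
      gB_tb s1 s2 ms mm go ge pd.1 (i-1) (j-1) (acc ++ [(s1.getD (i-1) ' ', s2.getD (j-1) ' ')])
    else if some p.2.1 = p.2.2.1 then
      gB_tb s1 s2 ms mm go ge pd.1 (i-1) j (acc ++ [(s1.getD (i-1) ' ', '-')])
    else
      gB_tb s1 s2 ms mm go ge pd.1 i (j-1) (acc ++ [('-', s2.getD (j-1) ' ')])
  else acc
  termination_by i + j
  decreasing_by all_goals omega

def gotoh_local_alignment_alt (seq1 : String) (seq2 : String) (match_score : Int) (mismatch_score : Int) (gap_open : Int) (gap_extend : Int) : String × String × Int :=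
  let s1 := seq1.toList
  let s2 := seq2.toList
  let n := s1.length
  let m := s2.length
  let sc := gB_scan s1 s2 match_score mismatch_score gap_open gap_extend n m
  let best := sc.2.foldl (fun acc x => if gB_gt x acc then x else acc) ((0 : Int), 0, 0)
  let bi := (-best.2.1).toNat
  let bj := (-best.2.2).toNat
  let pairs := gB_tb s1 s2 match_score mismatch_score gap_open gap_extend sc.1 bi bj []
  (String.mk (pairs.reverse.map Prod.fst), String.mk (pairs.reverse.map Prod.snd), best.1)

-- ===== PRECONDITION & SPEC =====
def Spec_gotoh_local_alignment (seq1 : String) (seq2 : String) (match_score : Int) (mismatch_score : Int) (gap_open : Int) (gap_extend : Int) (out : String × String × Int) : Prop := out = gotoh_local_alignment_alt seq1 seq2 match_score mismatch_score gap_open gap_extend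
instance (seq1 : String) (seq2 : String) (match_score : Int) (mismatch_score : Int) (gap_open : Int) (gap_extend : Int) (out : String × String × Int) : Decidable (Spec_gotoh_local_alignment seq1 seq2 match_score mismatch_score gap_open gap_extend out) := by unfold Spec_gotoh_local_alignment; infer_instance

-- ===== CLAIM (what is proved, stated in full; the proofs are below) =====
def Claim_equal_gotoh_local_alignment : Prop := ∀ (seq1 : String) (seq2 : String) (match_score : Int) (mismatch_score : Int) (gap_open : Int) (gap_extend : Int), Dom_gotoh_local_alignment seq1 seq2 match_score mismatch_score gap_open gap_extend → Spec_gotoh_local_alignment seq1 seq2 match_score mismatch_score gap_open gap_extend (gotoh_local_alignment seq1 seq2 match_score mismatch_score gap_open gap_extend)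

-- ===== LEMMAS AND PROOFS =====

-- the DP recurrence both programs compute: (M, Ix, Iy) at cell (i, j)
def pvRef (s1 s2 : List Char) (ms mm go ge : Int) : Nat → Nat → Int × Option Int × Option Int
  | 0, _ => (0, none, none)
  | _+1, 0 => (0, none, none)
  | i+1, j+1 =>
    let up := pvRef s1 s2 ms mm go ge i (j+1)
    let lf := pvRef s1 s2 ms mm go ge (i+1) j
    let dg := pvRef s1 s2 ms mm go ge i j
    let ix := gA_pmax (up.2.1.map (· + ge)) (up.1 + go + ge)
    let iy := gA_pmax (lf.2.2.map (· + ge)) (lf.1 + go + ge)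
    let sub := if s1.getD i ' ' = s2.getD j ' ' then ms else mm
    (max (max (max 0 (dg.1 + sub)) ix) iy, some ix, some iy)
  termination_by i j => i + j
  decreasing_by all_goals omega

-- components of the recurrence
def Mr (s1 s2 : List Char) (ms mm go ge : Int) (i j : Nat) : Int := (pvRef s1 s2 ms mm go ge i j).1
def Xr (s1 s2 : List Char) (ms mm go ge : Int) (i j : Nat) : Option Int := (pvRef s1 s2 ms mm go ge i j).2.1
def Yr (s1 s2 : List Char) (ms mm go ge : Int) (i j : Nat) : Option Int := (pvRef s1 s2 ms mm go ge i j).2.2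
def subr (s1 s2 : List Char) (ms mm : Int) (i j : Nat) : Int :=
  if s1.getD (i-1) ' ' = s2.getD (j-1) ' ' then ms else mm
def Xv (s1 s2 : List Char) (ms mm go ge : Int) (i j : Nat) : Int :=
  gA_pmax ((Xr s1 s2 ms mm go ge (i-1) j).map (· + ge)) (Mr s1 s2 ms mm go ge (i-1) j + go + ge)
def Yv (s1 s2 : List Char) (ms mm go ge : Int) (i j : Nat) : Int :=
  gA_pmax ((Yr s1 s2 ms mm go ge i (j-1)).map (· + ge)) (Mr s1 s2 ms mm go ge i (j-1) + go + ge)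

lemma Mr_zero_left (s1 s2 : List Char) (ms mm go ge : Int) (j : Nat) : Mr s1 s2 ms mm go ge 0 j = 0 := by
  cases j <;> simp [Mr, pvRef]
lemma Mr_zero_right (s1 s2 : List Char) (ms mm go ge : Int) (i : Nat) : Mr s1 s2 ms mm go ge i 0 = 0 := by
  cases i <;> simp [Mr, pvRef]
lemma Xr_zero_left (s1 s2 : List Char) (ms mm go ge : Int) (j : Nat) : Xr s1 s2 ms mm go ge 0 j = none := by
  cases j <;> simp [Xr, pvRef]
lemma Xr_zero_right (s1 s2 : List Char) (ms mm go ge : Int) (i : Nat) : Xr s1 s2 ms mm go ge i 0 = none := by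
  cases i <;> simp [Xr, pvRef]
lemma Yr_zero_right (s1 s2 : List Char) (ms mm go ge : Int) (i : Nat) : Yr s1 s2 ms mm go ge i 0 = none := by
  cases i <;> simp [Yr, pvRef]

lemma Xr_succ (s1 s2 : List Char) (ms mm go ge : Int) (i j : Nat) :
    Xr s1 s2 ms mm go ge (i+1) (j+1) = some (Xv s1 s2 ms mm go ge (i+1) (j+1)) := by
  simp [Xr, Xv, Mr, pvRef]
lemma Yr_succ (s1 s2 : List Char) (ms mm go ge : Int) (i j : Nat) :
    Yr s1 s2 ms mm go ge (i+1) (j+1) = some (Yv s1 s2 ms mm go ge (i+1) (j+1)) := by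
  simp [Yr, Yv, Mr, pvRef]
lemma Mr_succ (s1 s2 : List Char) (ms mm go ge : Int) (i j : Nat) :
    Mr s1 s2 ms mm go ge (i+1) (j+1) =
      max (max (max 0 (Mr s1 s2 ms mm go ge i j + subr s1 s2 ms mm (i+1) (j+1)))
        (Xv s1 s2 ms mm go ge (i+1) (j+1))) (Yv s1 s2 ms mm go ge (i+1) (j+1)) := by
  simp [Mr, Xv, Yv, Xr, Yr, subr, pvRef]

def tbSpec (s1 s2 : List Char) (ms mm go ge : Int) (i j : Nat) : Option Char :=
  if Mr s1 s2 ms mm go ge i j = 0 then none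
  else if Mr s1 s2 ms mm go ge i j = Mr s1 s2 ms mm go ge (i-1) (j-1) + subr s1 s2 ms mm i j then some 'D'
  else if some (Mr s1 s2 ms mm go ge i j) = Xr s1 s2 ms mm go ge i j then some 'U'
  else some 'L'

lemma tbSpec_zero_left (s1 s2 : List Char) (ms mm go ge : Int) (j : Nat) :
    tbSpec s1 s2 ms mm go ge 0 j = none := by simp [tbSpec, Mr_zero_left]
lemma tbSpec_zero_right (s1 s2 : List Char) (ms mm go ge : Int) (i : Nat) :
    tbSpec s1 s2 ms mm go ge i 0 = none := by simp [tbSpec, Mr_zero_right]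

-- the alignment read back from the best cell, in walk order (end first), as pairs
def walkP (s1 s2 : List Char) (ms mm go ge : Int) : Nat → Nat → List (Char × Char)
  | 0, _ => []
  | _+1, 0 => []
  | i+1, j+1 =>
    if Mr s1 s2 ms mm go ge (i+1) (j+1) = 0 then []
    else if Mr s1 s2 ms mm go ge (i+1) (j+1) = Mr s1 s2 ms mm go ge i j + subr s1 s2 ms mm (i+1) (j+1) then
      (s1.getD i ' ', s2.getD j ' ') :: walkP s1 s2 ms mm go ge i j
    else if some (Mr s1 s2 ms mm go ge (i+1) (j+1)) = Xr s1 s2 ms mm go ge (i+1) (j+1) then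
      (s1.getD i ' ', '-') :: walkP s1 s2 ms mm go ge i (j+1)
    else
      ('-', s2.getD j ' ') :: walkP s1 s2 ms mm go ge (i+1) j
  termination_by i j => i + j
  decreasing_by all_goals omega

-- running best-cell update of A; cells of the filled rows in row-major order
def stepA (st c : Int × Nat × Nat) : Int × Nat × Nat := if c.1 > st.1 then c else st
def cellsRow (s1 s2 : List Char) (ms mm go ge : Int) (i t : Nat) : List (Int × Nat × Nat) :=
  (List.range t).map (fun jj => (Mr s1 s2 ms mm go ge i (jj+1), i, jj+1))
def cellsA (s1 s2 : List Char) (ms mm go ge : Int) (m k : Nat) : List (Int × Nat × Nat) :=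
  (List.range k).flatMap (fun ii => cellsRow s1 s2 ms mm go ge (ii+1) m)

-- invariant of A's fill after the first k outer rows
def AInv (s1 s2 : List Char) (ms mm go ge : Int) (m k : Nat) (st : GAState) : Prop :=
  (∀ i j, st.M i j = if i ≤ k ∧ j ≤ m then Mr s1 s2 ms mm go ge i j else 0) ∧
  (∀ i j, st.Ix i j = if i ≤ k ∧ j ≤ m then Xr s1 s2 ms mm go ge i j else none) ∧
  (∀ i j, k < i → st.Iy i j = none) ∧
  (∀ i j, st.Tb i j = if i ≤ k ∧ j ≤ m then tbSpec s1 s2 ms mm go ge i j else none) ∧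
  (st.maxScore, st.maxPos.1, st.maxPos.2) = (cellsA s1 s2 ms mm go ge m k).foldl stepA (0, 0, 0)

-- invariant of A's inner loop on row k+1 after t cells
def InnerInv (s1 s2 : List Char) (ms mm go ge : Int) (m k t : Nat) (st : GAState) : Prop :=
  (∀ i j, st.M i j = if (i ≤ k ∧ j ≤ m) ∨ (i = k+1 ∧ j ≤ t) then Mr s1 s2 ms mm go ge i j else 0) ∧
  (∀ i j, st.Ix i j = if (i ≤ k ∧ j ≤ m) ∨ (i = k+1 ∧ j ≤ t) then Xr s1 s2 ms mm go ge i j else none) ∧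
  (st.Iy (k+1) t = Yr s1 s2 ms mm go ge (k+1) t ∧ ∀ i j, k+1 < i → st.Iy i j = none) ∧
  (∀ i j, st.Tb i j = if (i ≤ k ∧ j ≤ m) ∨ (i = k+1 ∧ j ≤ t) then tbSpec s1 s2 ms mm go ge i j else none) ∧
  (st.maxScore, st.maxPos.1, st.maxPos.2) =
    (cellsA s1 s2 ms mm go ge m k ++ cellsRow s1 s2 ms mm go ge (k+1) t).foldl stepA (0, 0, 0)


lemma gA_set_self {α : Type} (f : Nat → Nat → α) (i j : Nat) (v : α) : gA_set f i j v i j = v := by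
  simp [gA_set]

lemma gA_set_ne {α : Type} (f : Nat → Nat → α) (i j i' j' : Nat) (v : α)
    (h : ¬(i' = i ∧ j' = j)) : gA_set f i j v i' j' = f i' j' := by
  simp only [gA_set, if_neg h]

lemma cellsRow_succ (s1 s2 : List Char) (ms mm go ge : Int) (i t : Nat) :
    cellsRow s1 s2 ms mm go ge i (t+1)
      = cellsRow s1 s2 ms mm go ge i t ++ [(Mr s1 s2 ms mm go ge i (t+1), i, t+1)] := by
  simp [cellsRow, List.range_succ]

lemma inner_step (s1 s2 : List Char) (ms mm go ge : Int) (m k t : Nat) (st : GAState)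
    (ht : t < m) (h : InnerInv s1 s2 ms mm go ge m k t st) :
    InnerInv s1 s2 ms mm go ge m k (t+1) (gA_inner s1 s2 ms mm go ge (k+1) st t) := by
  obtain ⟨hM, hX, ⟨hYt, hYhi⟩, hT, hmax⟩ := h
  have eM : ∀ i j, ((i ≤ k ∧ j ≤ m) ∨ (i = k+1 ∧ j ≤ t)) → st.M i j = Mr s1 s2 ms mm go ge i j := by
    intro i j hij; rw [hM]; exact if_pos hij
  have eX : ∀ i j, ((i ≤ k ∧ j ≤ m) ∨ (i = k+1 ∧ j ≤ t)) → st.Ix i j = Xr s1 s2 ms mm go ge i j := by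
    intro i j hij; rw [hX]; exact if_pos hij
  have hxv : gA_pmax ((st.Ix k (t+1)).map (· + ge)) (st.M k (t+1) + go + ge)
      = Xv s1 s2 ms mm go ge (k+1) (t+1) := by
    rw [eX k (t+1) (Or.inl ⟨le_refl _, by omega⟩), eM k (t+1) (Or.inl ⟨le_refl _, by omega⟩)]; rfl
  have hyv : gA_pmax ((st.Iy (k+1) t).map (· + ge)) (st.M (k+1) t + go + ge)
      = Yv s1 s2 ms mm go ge (k+1) (t+1) := by
    rw [hYt, eM (k+1) t (Or.inr ⟨rfl, le_refl _⟩)]; rfl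
  unfold gA_inner
  simp only [Nat.add_sub_cancel]
  rw [show (if s1.getD k ' ' = s2.getD t ' ' then ms else mm) = subr s1 s2 ms mm (k+1) (t+1)
        from rfl,
      hxv, hyv, gA_set_ne st.M (k+1) (t+1) k t _ (by omega),
      eM k t (Or.inl ⟨le_refl _, by omega⟩), ← Mr_succ]
  refine ⟨?_, ?_, ⟨?_, ?_⟩, ?_, ?_⟩
  · -- M
    intro i j
    dsimp only
    by_cases hc : i = k+1 ∧ j = t+1
    · obtain ⟨rfl, rfl⟩ := hc
      rw [gA_set_self, if_pos (Or.inr ⟨rfl, le_refl _⟩)]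
    · rw [gA_set_ne _ _ _ _ _ _ hc, hM]
      split_ifs with h1 h2 <;> first | rfl | omega
  · -- Ix
    intro i j
    dsimp only
    by_cases hc : i = k+1 ∧ j = t+1
    · obtain ⟨rfl, rfl⟩ := hc
      rw [gA_set_self, if_pos (Or.inr ⟨rfl, le_refl _⟩), Xr_succ]
    · rw [gA_set_ne _ _ _ _ _ _ hc, hX]
      split_ifs with h1 h2 <;> first | rfl | omega
  · -- Iy at (k+1, t+1)
    dsimp only
    rw [gA_set_self, Yr_succ]
  · -- Iy above row k+1
    intro i j hi
    dsimp only
    rw [gA_set_ne _ _ _ _ _ _ (by omega)]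
    exact hYhi i j hi
  · -- Tb
    intro i j
    dsimp only
    by_cases hc : i = k+1 ∧ j = t+1
    · obtain ⟨rfl, rfl⟩ := hc
      rw [gA_set_self, if_pos (Or.inr ⟨rfl, le_refl _⟩), tbSpec]
      simp only [Nat.add_sub_cancel, Xr_succ, Option.some.injEq]
    · rw [gA_set_ne _ _ _ _ _ _ hc, hT]
      split_ifs with h1 h2 <;> first | rfl | omega
  · -- running max
    dsimp only
    rw [cellsRow_succ, ← List.append_assoc, List.foldl_append, ← hmax]
    by_cases hgt : Mr s1 s2 ms mm go ge (k+1) (t+1) > st.maxScore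
    · simp [stepA, hgt]
    · simp [stepA, hgt]

lemma inner_all (s1 s2 : List Char) (ms mm go ge : Int) (m k : Nat) (st : GAState)
    (h : InnerInv s1 s2 ms mm go ge m k 0 st) :
    ∀ t, t ≤ m → InnerInv s1 s2 ms mm go ge m k t
      ((List.range t).foldl (gA_inner s1 s2 ms mm go ge (k+1)) st) := by
  intro t
  induction t with
  | zero => intro _; simpa using h
  | succ t ih =>
    intro htm
    rw [List.range_succ, List.foldl_append]
    exact inner_step s1 s2 ms mm go ge m k t _ (by omega) (ih (by omega))

lemma cellsA_succ (s1 s2 : List Char) (ms mm go ge : Int) (m k : Nat) :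
    cellsA s1 s2 ms mm go ge m (k+1)
      = cellsA s1 s2 ms mm go ge m k ++ cellsRow s1 s2 ms mm go ge (k+1) m := by
  simp [cellsA, List.range_succ]

lemma AInv_fold (s1 s2 : List Char) (ms mm go ge : Int) (m : Nat) :
    ∀ k, AInv s1 s2 ms mm go ge m k
      ((List.range k).foldl
        (fun st ii => (List.range m).foldl (gA_inner s1 s2 ms mm go ge (ii+1)) st)
        ⟨fun _ _ => 0, fun _ _ => none, fun _ _ => none, fun _ _ => none, 0, (0, 0)⟩) := by
  intro k
  induction k with
  | zero =>
    simp only [List.range_zero, List.foldl_nil]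
    refine ⟨?_, ?_, ?_, ?_, ?_⟩ <;> dsimp only
    · intro i j; split_ifs with h1
      · obtain rfl : i = 0 := by omega
        rw [Mr_zero_left]
      · rfl
    · intro i j; split_ifs with h1
      · obtain rfl : i = 0 := by omega
        rw [Xr_zero_left]
      · rfl
    · intro i j _; rfl
    · intro i j; split_ifs with h1
      · obtain rfl : i = 0 := by omega
        rw [tbSpec_zero_left]
      · rfl
    · simp [cellsA]
  | succ k ih =>
    rw [List.range_succ, List.foldl_append]
    simp only [List.foldl_cons, List.foldl_nil]
    obtain ⟨hM, hX, hY, hT, hmax⟩ := ih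
    have h0 : InnerInv s1 s2 ms mm go ge m k 0
        ((List.range k).foldl
          (fun st ii => (List.range m).foldl (gA_inner s1 s2 ms mm go ge (ii+1)) st)
          ⟨fun _ _ => 0, fun _ _ => none, fun _ _ => none, fun _ _ => none, 0, (0, 0)⟩) := by
      refine ⟨?_, ?_, ⟨?_, ?_⟩, ?_, ?_⟩
      · intro i j; rw [hM]
        by_cases hc : i = k+1 ∧ j = 0
        · obtain ⟨rfl, rfl⟩ := hc
          rw [if_neg (by omega), if_pos (Or.inr ⟨rfl, le_refl _⟩), Mr_zero_right]
        · have he : ((i ≤ k ∧ j ≤ m) ∨ (i = k+1 ∧ j ≤ 0)) ↔ (i ≤ k ∧ j ≤ m) := by omega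
          simp only [he]
      · intro i j; rw [hX]
        by_cases hc : i = k+1 ∧ j = 0
        · obtain ⟨rfl, rfl⟩ := hc
          rw [if_neg (by omega), if_pos (Or.inr ⟨rfl, le_refl _⟩), Xr_zero_right]
        · have he : ((i ≤ k ∧ j ≤ m) ∨ (i = k+1 ∧ j ≤ 0)) ↔ (i ≤ k ∧ j ≤ m) := by omega
          simp only [he]
      · rw [hY (k+1) 0 (by omega), Yr_zero_right]
      · intro i j hi; exact hY i j (by omega)
      · intro i j; rw [hT]
        by_cases hc : i = k+1 ∧ j = 0
        · obtain ⟨rfl, rfl⟩ := hc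
          rw [if_neg (by omega), if_pos (Or.inr ⟨rfl, le_refl _⟩), tbSpec_zero_right]
        · have he : ((i ≤ k ∧ j ≤ m) ∨ (i = k+1 ∧ j ≤ 0)) ↔ (i ≤ k ∧ j ≤ m) := by omega
          simp only [he]
      · simpa [cellsRow] using hmax
    obtain ⟨hM', hX', ⟨hYt', hYhi'⟩, hT', hmax'⟩ := inner_all s1 s2 ms mm go ge m k _ h0 m (le_refl m)
    refine ⟨?_, ?_, ?_, ?_, ?_⟩
    · intro i j; rw [hM']
      have he : ((i ≤ k ∧ j ≤ m) ∨ (i = k+1 ∧ j ≤ m)) ↔ (i ≤ k+1 ∧ j ≤ m) := by omega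
      simp only [he]
    · intro i j; rw [hX']
      have he : ((i ≤ k ∧ j ≤ m) ∨ (i = k+1 ∧ j ≤ m)) ↔ (i ≤ k+1 ∧ j ≤ m) := by omega
      simp only [he]
    · intro i j hi; exact hYhi' i j hi
    · intro i j; rw [hT']
      have he : ((i ≤ k ∧ j ≤ m) ∨ (i = k+1 ∧ j ≤ m)) ↔ (i ≤ k+1 ∧ j ≤ m) := by omega
      simp only [he]
    · rw [cellsA_succ]; exact hmax'

-- ===== B-side lemmas =====

-- every value stored in the memo is the recurrence value of its key
def gB_ok (s1 s2 : List Char) (ms mm go ge : Int)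
    (memo : PySem.Dict (Nat × Nat) (Int × Option Int × Option Int)) : Prop :=
  ∀ i j r, memo.get? (i, j) = some r → r = pvRef s1 s2 ms mm go ge i j

lemma pvRef_base (s1 s2 : List Char) (ms mm go ge : Int) (i j : Nat) (h : i = 0 ∨ j = 0) :
    pvRef s1 s2 ms mm go ge i j = gB_base := by
  match i, j with
  | 0, j => simp [pvRef, gB_base]
  | i+1, 0 => simp [pvRef, gB_base]
  | i+1, j+1 => omega

-- a memo hit agrees with the recursive call (any stored value is coherent)
lemma gB_fast (s1 s2 : List Char) (ms mm go ge : Int)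
    (memo : PySem.Dict (Nat × Nat) (Int × Option Int × Option Int)) (i j : Nat)
    (hok : gB_ok s1 s2 ms mm go ge memo) :
    (match memo.get? (i, j) with
      | some u => (memo, u)
      | none => gB_cell s1 s2 ms mm go ge memo i j)
      = gB_cell s1 s2 ms mm go ge memo i j := by
  cases hm : memo.get? (i, j) with
  | none => rfl
  | some u =>
    by_cases h0 : i = 0 ∨ j = 0
    · rw [gB_cell, dif_pos h0, hok i j u hm, pvRef_base s1 s2 ms mm go ge i j h0]
    · rw [gB_cell, dif_neg h0, hm]

lemma gB_cell_eq (s1 s2 : List Char) (ms mm go ge : Int) :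
    ∀ N i j, i + j ≤ N → ∀ memo, gB_ok s1 s2 ms mm go ge memo →
      (gB_cell s1 s2 ms mm go ge memo i j).2 = pvRef s1 s2 ms mm go ge i j ∧
      gB_ok s1 s2 ms mm go ge (gB_cell s1 s2 ms mm go ge memo i j).1 := by
  intro N
  induction N with
  | zero =>
    intro i j hN memo hok
    obtain ⟨rfl, rfl⟩ : i = 0 ∧ j = 0 := by omega
    rw [gB_cell, dif_pos (Or.inl rfl)]
    exact ⟨(pvRef_base s1 s2 ms mm go ge 0 0 (Or.inl rfl)).symm, hok⟩
  | succ N ih =>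
    intro i j hN memo hok
    rw [gB_cell]
    by_cases h0 : i = 0 ∨ j = 0
    · rw [dif_pos h0]
      exact ⟨(pvRef_base s1 s2 ms mm go ge i j h0).symm, hok⟩
    · rw [dif_neg h0]
      cases hm : memo.get? (i, j) with
      | some r => exact ⟨hok i j r hm, hok⟩
      | none =>
        obtain ⟨a, rfl⟩ : ∃ a, i = a + 1 := ⟨i - 1, by omega⟩
        obtain ⟨b, rfl⟩ : ∃ b, j = b + 1 := ⟨j - 1, by omega⟩
        simp only [Nat.add_sub_cancel]
        obtain ⟨h1v, h1ok⟩ := ih a (b+1) (by omega) memo hok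
        rw [gB_fast s1 s2 ms mm go ge memo a (b+1) hok]
        obtain ⟨h2v, h2ok⟩ := ih (a+1) b (by omega) _ h1ok
        rw [gB_fast s1 s2 ms mm go ge _ (a+1) b h1ok]
        obtain ⟨h3v, h3ok⟩ := ih a b (by omega) _ h2ok
        rw [gB_fast s1 s2 ms mm go ge _ a b h2ok]
        have hmr : pvRef s1 s2 ms mm go ge a b
            = (Mr s1 s2 ms mm go ge a b, Xr s1 s2 ms mm go ge a b, Yr s1 s2 ms mm go ge a b) := rfl
        have hix : (match (pvRef s1 s2 ms mm go ge a (b+1)).2.1 with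
            | none => (pvRef s1 s2 ms mm go ge a (b+1)).1 + (go + ge)
            | some x => max ((pvRef s1 s2 ms mm go ge a (b+1)).1 + (go + ge)) (x + ge))
            = Xv s1 s2 ms mm go ge (a+1) (b+1) := by
          show (match Xr s1 s2 ms mm go ge a (b+1) with
            | none => Mr s1 s2 ms mm go ge a (b+1) + (go + ge)
            | some x => max (Mr s1 s2 ms mm go ge a (b+1) + (go + ge)) (x + ge))
            = Xv s1 s2 ms mm go ge (a+1) (b+1)
          cases hc : Xr s1 s2 ms mm go ge a (b+1) <;>
            simp [Xv, gA_pmax, hc, max_comm, add_assoc]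
        have hiy : (match (pvRef s1 s2 ms mm go ge (a+1) b).2.2 with
            | none => (pvRef s1 s2 ms mm go ge (a+1) b).1 + (go + ge)
            | some y => max ((pvRef s1 s2 ms mm go ge (a+1) b).1 + (go + ge)) (y + ge))
            = Yv s1 s2 ms mm go ge (a+1) (b+1) := by
          show (match Yr s1 s2 ms mm go ge (a+1) b with
            | none => Mr s1 s2 ms mm go ge (a+1) b + (go + ge)
            | some y => max (Mr s1 s2 ms mm go ge (a+1) b + (go + ge)) (y + ge))
            = Yv s1 s2 ms mm go ge (a+1) (b+1)
          cases hc : Yr s1 s2 ms mm go ge (a+1) b <;>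
            simp [Yv, gA_pmax, hc, max_comm, add_assoc]
        have hval : (max (max (max 0 ((pvRef s1 s2 ms mm go ge a b).1 +
              (if s1.getD a ' ' = s2.getD b ' ' then ms else mm)))
              (Xv s1 s2 ms mm go ge (a+1) (b+1))) (Yv s1 s2 ms mm go ge (a+1) (b+1)),
              some (Xv s1 s2 ms mm go ge (a+1) (b+1)), some (Yv s1 s2 ms mm go ge (a+1) (b+1)))
            = pvRef s1 s2 ms mm go ge (a+1) (b+1) := by
          rw [show (pvRef s1 s2 ms mm go ge a b).1 = Mr s1 s2 ms mm go ge a b from rfl,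
            show (if s1.getD a ' ' = s2.getD b ' ' then ms else mm)
              = subr s1 s2 ms mm (a+1) (b+1) from rfl, ← Mr_succ,
            show pvRef s1 s2 ms mm go ge (a+1) (b+1)
              = (Mr s1 s2 ms mm go ge (a+1) (b+1), Xr s1 s2 ms mm go ge (a+1) (b+1),
                 Yr s1 s2 ms mm go ge (a+1) (b+1)) from rfl, Xr_succ, Yr_succ]
        simp only [h1v, h2v, h3v, hix, hiy]
        refine ⟨hval, ?_⟩
        intro i' j' r' hr'
        rw [PySem.Dict.get?_insert] at hr'
        by_cases hk : (i', j') = (a+1, b+1)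
        · rw [if_pos hk] at hr'
          obtain ⟨rfl, rfl⟩ := Prod.mk.injEq .. ▸ hk
          injection hr' with hr'
          rw [← hr', hval]
        · rw [if_neg hk] at hr'
          exact h3ok i' j' r' hr'

lemma gB_ok_empty (s1 s2 : List Char) (ms mm go ge : Int) :
    gB_ok s1 s2 ms mm go ge PySem.Dict.empty := by
  intro i j r hr
  rw [PySem.Dict.get?_empty] at hr
  cases hr

-- B's comprehension collects exactly A's cells, with negated indices
def gB_f (c : Int × Nat × Nat) : Int × Int × Int := (c.1, -(c.2.1 : Int), -(c.2.2 : Int))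

lemma gB_scan_inner (s1 s2 : List Char) (ms mm go ge : Int) (ii : Nat) :
    ∀ t memo acc, gB_ok s1 s2 ms mm go ge memo →
      (List.range t).foldl (fun st2 jj =>
          let p := gB_cell s1 s2 ms mm go ge st2.1 (ii+1) (jj+1)
          (p.1, st2.2 ++ [(p.2.1, -((ii : Int)+1), -((jj : Int)+1))])) (memo, acc)
        = (((List.range t).foldl (fun st2 jj =>
            let p := gB_cell s1 s2 ms mm go ge st2.1 (ii+1) (jj+1)
            (p.1, st2.2 ++ [(p.2.1, -((ii : Int)+1), -((jj : Int)+1))])) (memo, acc)).1,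
           acc ++ (cellsRow s1 s2 ms mm go ge (ii+1) t).map gB_f) ∧
      gB_ok s1 s2 ms mm go ge (((List.range t).foldl (fun st2 jj =>
          let p := gB_cell s1 s2 ms mm go ge st2.1 (ii+1) (jj+1)
          (p.1, st2.2 ++ [(p.2.1, -((ii : Int)+1), -((jj : Int)+1))])) (memo, acc)).1) := by
  intro t
  induction t with
  | zero => intro memo acc hok; simpa [cellsRow] using hok
  | succ t ih =>
    intro memo acc hok
    obtain ⟨heq, hok'⟩ := ih memo acc hok
    rw [List.range_succ, List.foldl_append, List.foldl_cons, List.foldl_nil, heq]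
    rw [heq] at hok'
    obtain ⟨hv, hok''⟩ := gB_cell_eq s1 s2 ms mm go ge ((ii+1)+(t+1)) (ii+1) (t+1) (le_refl _) _ hok'
    dsimp only
    rw [hv]
    refine ⟨?_, hok''⟩
    rw [cellsRow_succ, List.map_append, ← List.append_assoc]
    simp [gB_f, Mr]

lemma gB_scan_eq (s1 s2 : List Char) (ms mm go ge : Int) (m : Nat) :
    ∀ n, (gB_scan s1 s2 ms mm go ge n m).2 = (cellsA s1 s2 ms mm go ge m n).map gB_f ∧
      gB_ok s1 s2 ms mm go ge (gB_scan s1 s2 ms mm go ge n m).1 := by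
  intro n
  induction n with
  | zero =>
    exact ⟨by simp [gB_scan, cellsA], gB_ok_empty s1 s2 ms mm go ge⟩
  | succ n ih =>
    obtain ⟨hlist, hok⟩ := ih
    have hstep : gB_scan s1 s2 ms mm go ge (n+1) m
        = (List.range m).foldl (fun st2 jj =>
            let p := gB_cell s1 s2 ms mm go ge st2.1 (n+1) (jj+1)
            (p.1, st2.2 ++ [(p.2.1, -((n : Int)+1), -((jj : Int)+1))]))
          (gB_scan s1 s2 ms mm go ge n m) := by
      unfold gB_scan
      rw [List.range_succ, List.foldl_append, List.foldl_cons, List.foldl_nil]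
    obtain ⟨heq, hok'⟩ := gB_scan_inner s1 s2 ms mm go ge n m
      (gB_scan s1 s2 ms mm go ge n m).1 (gB_scan s1 s2 ms mm go ge n m).2 hok
    rw [hstep]
    constructor
    · rw [heq]
      dsimp only
      rw [hlist, cellsA_succ, List.map_append]
    · exact hok'

def posLt (p q : Nat × Nat) : Prop := p.1 < q.1 ∨ (p.1 = q.1 ∧ p.2 < q.2)

-- B's fold with lexicographic-greater computes A's running strict max
lemma fold_maxneg : ∀ (l : List (Int × Nat × Nat)) (s : Int) (p q : Nat),
    (∀ c ∈ l, posLt (p, q) (c.2.1, c.2.2)) →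
    l.Pairwise (fun a b => posLt (a.2.1, a.2.2) (b.2.1, b.2.2)) →
    List.foldl (fun acc x => if gB_gt x acc then x else acc) (s, -(p : Int), -(q : Int))
        (l.map gB_f)
      = gB_f (List.foldl stepA (s, p, q) l) := by
  intro l
  induction l with
  | nil => intro s p q _ _; rfl
  | cons c tl ih =>
    intro s p q hp hpw
    simp only [List.map_cons, List.foldl_cons]
    by_cases hgt : c.1 > s
    · have ht : gB_gt (gB_f c) (s, -(p : Int), -(q : Int)) = true := by
        simp only [gB_gt, gB_f, Bool.or_eq_true, decide_eq_true_eq, Bool.and_eq_true, beq_iff_eq]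
        omega
      have hs : stepA (s, p, q) c = c := by simp [stepA, hgt]
      rw [ht, if_pos rfl, hs, show gB_f c = (c.1, -(c.2.1 : Int), -(c.2.2 : Int)) from rfl]
      exact ih c.1 c.2.1 c.2.2
        (fun x hx => (List.pairwise_cons.mp hpw).1 x hx)
        (List.pairwise_cons.mp hpw).2
    · have hple := hp c List.mem_cons_self
      have ht : gB_gt (gB_f c) (s, -(p : Int), -(q : Int)) = false := by
        apply Bool.eq_false_iff.mpr
        intro htr
        simp only [gB_gt, gB_f, Bool.or_eq_true, decide_eq_true_eq, Bool.and_eq_true,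
          beq_iff_eq] at htr
        simp only [posLt] at hple
        omega
      have hs : stepA (s, p, q) c = (s, p, q) := by simp [stepA, hgt]
      rw [ht, if_neg (by exact Bool.false_ne_true), hs]
      exact ih s p q (fun x hx => hp x (List.mem_cons_of_mem _ hx)) (List.pairwise_cons.mp hpw).2

lemma fold_stepA_bound (nb mb : Nat) : ∀ (l : List (Int × Nat × Nat)) (s : Int) (p q : Nat),
    (∀ c ∈ l, c.2.1 ≤ nb ∧ c.2.2 ≤ mb) → p ≤ nb → q ≤ mb →
    (List.foldl stepA (s, p, q) l).2.1 ≤ nb ∧ (List.foldl stepA (s, p, q) l).2.2 ≤ mb := by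
  intro l
  induction l with
  | nil => intro s p q _ hp hq; exact ⟨hp, hq⟩
  | cons c tl ih =>
    intro s p q hmem hp hq
    simp only [List.foldl_cons]
    by_cases hgt : c.1 > s
    · have hs : stepA (s, p, q) c = c := by simp [stepA, hgt]
      rw [hs, show c = (c.1, c.2.1, c.2.2) from rfl]
      exact ih c.1 c.2.1 c.2.2 (fun x hx => hmem x (List.mem_cons_of_mem _ hx))
        (hmem c List.mem_cons_self).1 (hmem c List.mem_cons_self).2
    · have hs : stepA (s, p, q) c = (s, p, q) := by simp [stepA, hgt]
      rw [hs]
      exact ih s p q (fun x hx => hmem x (List.mem_cons_of_mem _ hx)) hp hq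

lemma mem_cellsA (s1 s2 : List Char) (ms mm go ge : Int) (m k : Nat) (c : Int × Nat × Nat)
    (hc : c ∈ cellsA s1 s2 ms mm go ge m k) :
    1 ≤ c.2.1 ∧ c.2.1 ≤ k ∧ 1 ≤ c.2.2 ∧ c.2.2 ≤ m := by
  simp only [cellsA, cellsRow, List.mem_flatMap, List.mem_map, List.mem_range] at hc
  obtain ⟨ii, hii, jj, hjj, rfl⟩ := hc
  simp only
  omega

lemma pairwise_cellsA (s1 s2 : List Char) (ms mm go ge : Int) (m : Nat) :
    ∀ k, (cellsA s1 s2 ms mm go ge m k).Pairwise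
      (fun a b => posLt (a.2.1, a.2.2) (b.2.1, b.2.2)) := by
  intro k
  induction k with
  | zero => simp [cellsA]
  | succ k ih =>
    rw [cellsA_succ, List.pairwise_append]
    refine ⟨ih, ?_, ?_⟩
    · rw [cellsRow, List.pairwise_map]
      refine List.Pairwise.imp ?_ (List.pairwise_lt_range)
      intro a b hab
      dsimp only
      right
      exact ⟨rfl, by omega⟩
    · intro a ha b hb
      have h1 := mem_cellsA s1 s2 ms mm go ge m k a ha
      simp only [cellsRow, List.mem_map, List.mem_range] at hb
      obtain ⟨jj, hjj, rfl⟩ := hb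
      left; simp only; omega

lemma walkP_zero_left (s1 s2 : List Char) (ms mm go ge : Int) (j : Nat) :
    walkP s1 s2 ms mm go ge 0 j = [] := by cases j <;> simp [walkP]
lemma walkP_zero_right (s1 s2 : List Char) (ms mm go ge : Int) (i : Nat) :
    walkP s1 s2 ms mm go ge i 0 = [] := by cases i <;> simp [walkP]

-- A's traceback loop produces the walk (appended, end first)
lemma gA_tb_eq (s1 s2 : List Char) (ms mm go ge : Int) (M : Nat → Nat → Int)
    (Tb : Nat → Nat → Option Char) :
    ∀ fuel i j a1 a2, i + j < fuel →
    (∀ i' j', i' ≤ i → j' ≤ j →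
      M i' j' = Mr s1 s2 ms mm go ge i' j' ∧ Tb i' j' = tbSpec s1 s2 ms mm go ge i' j') →
    gA_tb s1 s2 M Tb fuel i j a1 a2
      = (a1 ++ (walkP s1 s2 ms mm go ge i j).map Prod.fst,
         a2 ++ (walkP s1 s2 ms mm go ge i j).map Prod.snd) := by
  intro fuel
  induction fuel with
  | zero => intro i j a1 a2 hf; omega
  | succ fuel ih =>
    intro i j a1 a2 hf hag
    match i, j with
    | 0, j => simp [gA_tb, walkP_zero_left]
    | i+1, 0 => simp [gA_tb, walkP_zero_right]
    | i+1, j+1 =>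
      obtain ⟨hMij, hTij⟩ := hag (i+1) (j+1) (le_refl _) (le_refl _)
      by_cases h0 : Mr s1 s2 ms mm go ge (i+1) (j+1) = 0
      · rw [show gA_tb s1 s2 M Tb (fuel+1) (i+1) (j+1) a1 a2 = (a1, a2) from by
          rw [gA_tb]; rw [if_neg (by rw [hMij]; simp [h0])]]
        rw [walkP, if_pos h0]
        simp
      · rw [gA_tb, if_pos ⟨by omega, by omega, by rw [hMij]; exact h0⟩, hTij, tbSpec,
          if_neg h0]
        simp only [Nat.add_sub_cancel]
        rw [walkP, if_neg h0]
        by_cases hd : Mr s1 s2 ms mm go ge (i+1) (j+1)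
            = Mr s1 s2 ms mm go ge i j + subr s1 s2 ms mm (i+1) (j+1)
        · rw [if_pos hd, if_pos rfl,
            ih i j _ _ (by omega) (fun i' j' h1 h2 => hag i' j' (by omega) (by omega))]
          simp [hd]
        · rw [if_neg hd]
          by_cases hu : some (Mr s1 s2 ms mm go ge (i+1) (j+1)) = Xr s1 s2 ms mm go ge (i+1) (j+1)
          · rw [if_pos hu, if_neg (by simp), if_pos rfl,
              ih i (j+1) _ _ (by omega) (fun i' j' h1 h2 => hag i' j' (by omega) (by omega))]
            simp [hd, hu]
          · rw [if_neg hu, if_neg (by simp), if_neg (by simp), if_pos rfl,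
              ih (i+1) j _ _ (by omega) (fun i' j' h1 h2 => hag i' j' (by omega) (by omega))]
            simp [hd, hu]

-- B's traceback loop produces the same walk
lemma gB_tb_eq (s1 s2 : List Char) (ms mm go ge : Int) :
    ∀ N i j, i + j ≤ N → ∀ memo acc, gB_ok s1 s2 ms mm go ge memo →
    gB_tb s1 s2 ms mm go ge memo i j acc = acc ++ walkP s1 s2 ms mm go ge i j := by
  intro N
  induction N with
  | zero =>
    intro i j hf memo acc hok
    obtain ⟨rfl, rfl⟩ : i = 0 ∧ j = 0 := by omega
    rw [gB_tb, dif_neg (by omega)]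
    simp [walkP_zero_left]
  | succ N ih =>
    intro i j hf memo acc hok
    match i, j with
    | 0, j =>
      rw [gB_tb, dif_neg (by omega)]
      simp [walkP_zero_left]
    | i+1, 0 =>
      rw [gB_tb, dif_neg (by omega)]
      simp [walkP_zero_right]
    | i+1, j+1 =>
      obtain ⟨hv, hok1⟩ := gB_cell_eq s1 s2 ms mm go ge ((i+1)+(j+1)) (i+1) (j+1) (le_refl _) memo hok
      rw [gB_tb]
      simp only [Nat.add_sub_cancel, hv]
      have hv1 : (pvRef s1 s2 ms mm go ge (i+1) (j+1)).1 = Mr s1 s2 ms mm go ge (i+1) (j+1) := rfl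
      have hv2 : (pvRef s1 s2 ms mm go ge (i+1) (j+1)).2.1 = Xr s1 s2 ms mm go ge (i+1) (j+1) := rfl
      by_cases h0 : Mr s1 s2 ms mm go ge (i+1) (j+1) = 0
      · rw [dif_neg (by rw [hv1]; simp [h0]), walkP, if_pos h0]
        simp
      · rw [dif_pos ⟨by omega, by omega, by rw [hv1]; exact h0⟩]
        obtain ⟨hvd, hok2⟩ := gB_cell_eq s1 s2 ms mm go ge (i+j) i j (le_refl _) _ hok1
        simp only [hvd, hv1, hv2]
        have hvd1 : (pvRef s1 s2 ms mm go ge i j).1 = Mr s1 s2 ms mm go ge i j := rfl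
        rw [walkP, if_neg h0]
        by_cases hd : Mr s1 s2 ms mm go ge (i+1) (j+1)
            = Mr s1 s2 ms mm go ge i j + subr s1 s2 ms mm (i+1) (j+1)
        · rw [if_pos (by rw [hvd1]; exact hd), if_pos hd,
            ih i j (by omega) _ _ hok2]
          simp
        · rw [if_neg (by rw [hvd1]; exact hd), if_neg hd]
          by_cases hu : some (Mr s1 s2 ms mm go ge (i+1) (j+1)) = Xr s1 s2 ms mm go ge (i+1) (j+1)
          · rw [if_pos hu, if_pos hu, ih i (j+1) (by omega) _ _ hok2]
            simp
          · rw [if_neg hu, if_neg hu, ih (i+1) j (by omega) _ _ hok2]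
            simp

-- ===== VERDICT (by name: the statement is the Claim_ definition above) =====
theorem gotoh_local_alignment_spec : Claim_equal_gotoh_local_alignment := by
  intro seq1 seq2 ms mm go ge _
  unfold Spec_gotoh_local_alignment gotoh_local_alignment gotoh_local_alignment_alt
  set s1 := seq1.toList with hs1
  set s2 := seq2.toList with hs2
  set n := s1.length with hn
  set m := s2.length with hm
  obtain ⟨hM, hX, hY, hT, hmax⟩ := AInv_fold s1 s2 ms mm go ge m n
  obtain ⟨hscan, hok⟩ := gB_scan_eq s1 s2 ms mm go ge m n
  have hfold := fold_maxneg (cellsA s1 s2 ms mm go ge m n) 0 0 0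
    (fun c hc => Or.inl (by have := mem_cellsA s1 s2 ms mm go ge m n c hc; omega))
    (pairwise_cellsA s1 s2 ms mm go ge m n)
  simp only [Nat.cast_zero, neg_zero] at hfold
  have hbound := fold_stepA_bound n m (cellsA s1 s2 ms mm go ge m n) 0 0 0
    (fun c hc => by have := mem_cellsA s1 s2 ms mm go ge m n c hc; omega)
    (by omega) (by omega)
  dsimp only
  rw [hscan, hfold, ← hmax]
  dsimp only [gB_f]
  set AF := List.foldl (fun st ii => List.foldl (gA_inner s1 s2 ms mm go ge (ii + 1)) st (List.range m))
    ({ M := fun _ _ => 0, Ix := fun _ _ => none, Iy := fun _ _ => none, Tb := fun _ _ => none,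
       maxScore := 0, maxPos := (0, 0) } : GAState) (List.range n) with hAF
  rw [← hmax] at hbound
  have hb1 : AF.maxPos.1 ≤ n := hbound.1
  have hb2 : AF.maxPos.2 ≤ m := hbound.2
  rw [gA_tb_eq s1 s2 ms mm go ge AF.M AF.Tb (AF.maxPos.1 + AF.maxPos.2 + 1)
      AF.maxPos.1 AF.maxPos.2 [] [] (by omega)
      (fun i' j' h1 h2 => ⟨by rw [hM i' j', if_pos ⟨by omega, by omega⟩],
                           by rw [hT i' j', if_pos ⟨by omega, by omega⟩]⟩)]
  have hbtn : (-(-(AF.maxPos.1 : Int))).toNat = AF.maxPos.1 := by omega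
  have hbtm : (-(-(AF.maxPos.2 : Int))).toNat = AF.maxPos.2 := by omega
  rw [hbtn, hbtm,
    gB_tb_eq s1 s2 ms mm go ge (AF.maxPos.1 + AF.maxPos.2) AF.maxPos.1 AF.maxPos.2
      (le_refl _) _ [] hok]
  simp [List.map_reverse]
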